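-- pv_equiv track=rewrite | github.com/bbugyi200/dotfiles | home/lib/gai/src/status_state_machine/field_updates.py | read_status_from_lines
-- ===== SOURCE A (Python) =====
-- def read_status_from_lines(lines: list[str], changespec_name: str) -> str | None:
--     """Read STATUS from file lines (unlocked helper).
--
--     Args:
--         lines: File lines to search.
--         changespec_name: NAME of the ChangeSpec to find.
--
--     Returns:
--         Current STATUS value, or None if not found.
--     """
--     in_target_changespec = False
--     for line in lines:
--         if line.startswith("NAME:"):
--             current_name = line.split(":", 1)[1].strip()
--             in_target_changespec = current_name == changespec_name
--         if in_target_changespec and line.startswith("STATUS:"):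
--             return line.split(":", 1)[1].strip()
--     return None
-- ===== SOURCE B (Python) =====
-- def read_status_from_lines(lines: list[str], changespec_name: str) -> str | None:
--     """Read STATUS from file lines: split into NAME-headed blocks first, then search."""
--     n = len(lines)
--     # index-based grouping: find each NAME header and collect its block body
--     i = 0
--     while i < n and not lines[i].startswith("NAME:"):
--         i += 1
--     blocks = []
--     while i < n:
--         name = lines[i].split(":", 1)[1].strip()
--         i += 1
--         body = []
--         while i < n and not lines[i].startswith("NAME:"):
--             body.append(lines[i])
--             i += 1
--         blocks.append((name, body))
--     # first matching-named block that actually carries a STATUS wins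
--     for name, body in blocks:
--         if name == changespec_name:
--             for line in body:
--                 if line.startswith("STATUS:"):
--                     return line.split(":", 1)[1].strip()
--     return None
-- ===== Notes on version B (the rewrite author's own statement) =====
-- stated objective: alternative
-- what changed: B first parses the lines into a list of NAME-headed blocks (name, body) and then searches the blocks for a matching name carrying a STATUS line, instead of A's single stateful scan with an in_target flag.
import Mathlib
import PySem

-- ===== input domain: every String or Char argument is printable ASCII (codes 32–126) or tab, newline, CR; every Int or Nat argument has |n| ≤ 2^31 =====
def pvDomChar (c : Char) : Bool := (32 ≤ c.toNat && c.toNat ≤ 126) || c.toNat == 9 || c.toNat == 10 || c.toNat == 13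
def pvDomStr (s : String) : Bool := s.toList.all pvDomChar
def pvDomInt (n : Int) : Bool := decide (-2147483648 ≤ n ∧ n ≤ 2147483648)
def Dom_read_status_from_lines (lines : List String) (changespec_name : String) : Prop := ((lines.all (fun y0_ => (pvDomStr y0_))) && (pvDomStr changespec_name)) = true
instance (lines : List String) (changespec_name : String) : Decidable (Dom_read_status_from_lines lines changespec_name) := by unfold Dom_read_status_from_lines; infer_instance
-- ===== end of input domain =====

-- B parses the lines into NAME-headed blocks first and then searches the blocks,
-- instead of A's single stateful scan with an in_target flag (alternative decomposition).


-- shared parse expression: line.split(":", 1)[1].strip()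
-- (the [1] index is in range wherever either Python evaluates it, since the line
--  starts with "NAME:"/"STATUS:" and hence contains ':'; List.getD is exact there)
def pvPayload (line : String) : String :=
  PySem.Str.strip (((PySem.Str.splitMax? line ":" 1).getD []).getD 1 "")

-- ===== PORT A =====
-- A's loop: state is the in_target_changespec flag
def pvIsName (l : String) : Bool := PySem.Str.startswith l "NAME:"
def pvIsStatus (l : String) : Bool := PySem.Str.startswith l "STATUS:"

def pvLoopA (cn : String) : List String → Bool → Option String
  | [], _ => none
  | l :: rest, inT =>
    let inT' := if pvIsName l then pvPayload l == cn else inT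
    if inT' && pvIsStatus l then some (pvPayload l)
    else pvLoopA cn rest inT'

def read_status_from_lines (lines : List String) (changespec_name : String) : Option String :=
  pvLoopA changespec_name lines false

-- ===== PORT B =====
-- the block-collection loop of Source B: each NAME header with the body up to the next NAME
def pvBlocks : List String → List (String × List String)
  | [] => []
  | l :: rest =>
    (pvPayload l, rest.takeWhile (fun x => !pvIsName x)) ::
      pvBlocks (rest.dropWhile (fun x => !pvIsName x))
termination_by ls => ls.length
decreasing_by
  simpa using Nat.lt_succ_of_le (List.length_dropWhile_le _ _)

def pvFindStatus (body : List String) : Option String :=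
  (body.find? (fun x => pvIsStatus x)).map pvPayload

def read_status_from_lines_alt (lines : List String) (changespec_name : String) : Option String :=
  (pvBlocks (lines.dropWhile (fun x => !pvIsName x))).findSome?
    (fun b => if b.1 == changespec_name then pvFindStatus b.2 else none)

-- ===== PRECONDITION & SPEC =====
def Spec_read_status_from_lines (lines : List String) (changespec_name : String) (out : Option String) : Prop := out = read_status_from_lines_alt lines changespec_name
instance (lines : List String) (changespec_name : String) (out : Option String) : Decidable (Spec_read_status_from_lines lines changespec_name out) := by unfold Spec_read_status_from_lines; infer_instance

-- ===== CLAIM (what is proved, stated in full; the proofs are below) =====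
def Claim_equal_read_status_from_lines : Prop := ∀ (lines : List String) (changespec_name : String), Dom_read_status_from_lines lines changespec_name → Spec_read_status_from_lines lines changespec_name (read_status_from_lines lines changespec_name)

-- ===== LEMMAS AND PROOFS =====

-- a line starting with "NAME:" does not start with "STATUS:"
theorem pvName_not_status (l : String) (h : pvIsName l = true) :
    pvIsStatus l = false := by
  by_contra hs
  simp only [Bool.not_eq_false] at hs
  rw [pvIsName] at h
  rw [pvIsStatus] at hs
  simp only [PySem.Str.startswith_eq] at h hs
  rw [PySem.Chars.startswith_iff] at h hs
  obtain ⟨t1, h1⟩ := h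
  obtain ⟨t2, h2⟩ := hs
  have : l.toList.head? = some 'N' := by rw [← h1]; rfl
  have h2' : l.toList.head? = some 'S' := by rw [← h2]; rfl
  simp [this] at h2'

-- with the flag off, non-NAME lines are skipped
theorem pvSkip (cn : String) (p rest : List String)
    (hp : ∀ x ∈ p, pvIsName x = false) :
    pvLoopA cn (p ++ rest) false = pvLoopA cn rest false := by
  induction p with
  | nil => rfl
  | cons l p ih =>
    have hl : pvIsName l = false := hp l (by simp)
    rw [List.cons_append, pvLoopA]
    simp only [hl, Bool.false_eq_true, if_false, Bool.false_and]
    exact ih (fun x hx => hp x (by simp [hx]))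

-- with the flag on, a run of non-NAME lines returns the first STATUS payload
theorem pvScan (cn : String) (p rest : List String)
    (hp : ∀ x ∈ p, pvIsName x = false) :
    pvLoopA cn (p ++ rest) true =
      match p.find? (fun x => pvIsStatus x) with
      | some x => some (pvPayload x)
      | none => pvLoopA cn rest true := by
  induction p with
  | nil => rfl
  | cons l p ih =>
    have hl : pvIsName l = false := hp l (by simp)
    rw [List.cons_append, pvLoopA, List.find?]
    simp only [hl, Bool.false_eq_true, if_false, Bool.true_and]
    cases hs : pvIsStatus l with
    | true => simp
    | false =>
      simp only [Bool.false_eq_true, if_false]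
      exact ih (fun x hx => hp x (by simp [hx]))

-- the flag is irrelevant when the next line is a NAME header
theorem pvNameIndep (cn : String) (l : String) (r : List String)
    (h : pvIsName l = true) (b1 b2 : Bool) :
    pvLoopA cn (l :: r) b1 = pvLoopA cn (l :: r) b2 := by
  rw [pvLoopA, pvLoopA]
  simp [h]

-- the shape of dropWhile: empty, or headed by a line failing the predicate
theorem pvDropShape (p : String → Bool) (xs : List String) :
    xs.dropWhile p = [] ∨ ∃ l t, xs.dropWhile p = l :: t ∧ p l = false := by
  induction xs with
  | nil => exact Or.inl rfl
  | cons a xs ih =>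
    rw [List.dropWhile_cons]
    by_cases h : p a = true
    · simpa [h] using ih
    · simp only [Bool.not_eq_true] at h
      exact Or.inr ⟨a, xs, by simp [h], h⟩

-- main invariant: on a list that is empty or starts with a NAME header
theorem pvMainAux (cn : String) : ∀ (n : Nat) (r : List String), r.length ≤ n →
    (r = [] ∨ ∃ l t, r = l :: t ∧ pvIsName l = true) →
    pvLoopA cn r false =
      (pvBlocks r).findSome? (fun b => if b.1 == cn then pvFindStatus b.2 else none) := by
  intro n
  induction n with
  | zero =>
    intro r hr _
    have : r = [] := List.length_eq_zero_iff.mp (Nat.le_zero.mp hr)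
    subst this; simp [pvLoopA, pvBlocks]
  | succ n ih =>
    intro r hr hshape
    rcases hshape with h0 | ⟨l, t, rfl, hname⟩
    · subst h0; simp [pvLoopA, pvBlocks]
    · have hns := pvName_not_status l hname
      -- unfold both sides one step
      rw [pvLoopA, pvBlocks, List.findSome?_cons]
      simp only [hname, if_true, hns, Bool.and_false, Bool.false_eq_true, if_false]
      have hsplit := List.takeWhile_append_dropWhile (p := fun x => !pvIsName x) (l := t)
      set body := t.takeWhile (fun x => !pvIsName x) with hbody
      set rest := t.dropWhile (fun x => !pvIsName x) with hrest
      have hbodyF : ∀ x ∈ body, pvIsName x = false := by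
        intro x hx
        have := List.mem_takeWhile_imp hx
        simpa using this
      have hrestlen : rest.length ≤ n := by
        have h1 : rest.length ≤ t.length := by
          rw [hrest]; exact List.length_dropWhile_le _ _
        have h2 : t.length ≤ n := by simpa using Nat.le_of_succ_le_succ hr
        omega
      have hrestshape : rest = [] ∨ ∃ l' t', rest = l' :: t' ∧ pvIsName l' = true := by
        rcases pvDropShape (fun x => !pvIsName x) t with h | ⟨l', t', heq, hp⟩
        · exact Or.inl (by rw [hrest]; exact h)
        · refine Or.inr ⟨l', t', by rw [hrest]; exact heq, ?_⟩
          simpa using hp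
      have hrestfalse : pvLoopA cn rest false =
          (pvBlocks rest).findSome? (fun b => if b.1 == cn then pvFindStatus b.2 else none) :=
        ih rest hrestlen hrestshape
      cases hmatch : (pvPayload l == cn) with
      | true =>
        -- flag turns on: scan the body, fall through to the next block on no STATUS
        have htrue : pvLoopA cn rest true = pvLoopA cn rest false := by
          rcases hrestshape with h0 | ⟨l', t', heq, hn'⟩
          · rw [h0]; rfl
          · rw [heq]; exact pvNameIndep cn l' t' hn' true false
        rw [if_pos rfl, ← hsplit, pvScan cn body rest hbodyF]
        cases hfind : body.find? (fun x => pvIsStatus x) with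
        | some x => simp [pvFindStatus, hfind]
        | none =>
          simp only [pvFindStatus, hfind, Option.map_none]
          rw [htrue]; exact hrestfalse
      | false =>
        -- flag stays off: skip the body
        rw [if_neg (by simp), ← hsplit, pvSkip cn body rest hbodyF, hrestfalse]

-- ===== VERDICT (by name: the statement is the Claim_ definition above) =====
theorem read_status_from_lines_spec : Claim_equal_read_status_from_lines := by
  intro lines cn _
  unfold Spec_read_status_from_lines read_status_from_lines read_status_from_lines_alt
  have hsplit := List.takeWhile_append_dropWhile (p := fun x => !pvIsName x) (l := lines)
  set rest := lines.dropWhile (fun x => !pvIsName x) with hrest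
  have hpre : ∀ x ∈ lines.takeWhile (fun x => !pvIsName x), pvIsName x = false := by
    intro x hx; simpa using List.mem_takeWhile_imp hx
  have hshape : rest = [] ∨ ∃ l' t', rest = l' :: t' ∧ pvIsName l' = true := by
    rcases pvDropShape (fun x => !pvIsName x) lines with h | ⟨l', t', heq, hp⟩
    · exact Or.inl (by rw [hrest]; exact h)
    · exact Or.inr ⟨l', t', by rw [hrest]; exact heq, by simpa using hp⟩
  calc pvLoopA cn lines false
      = pvLoopA cn (lines.takeWhile (fun x => !pvIsName x) ++ rest) false := by rw [hsplit]
    _ = pvLoopA cn rest false := pvSkip cn _ rest hpre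
    _ = (pvBlocks rest).findSome? (fun b => if b.1 == cn then pvFindStatus b.2 else none) :=
        pvMainAux cn rest.length rest le_rfl hshape
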